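-- pv_equiv track=rewrite | github.com/michalholes/patchhub | scripts/patchhub/indexing.py | parse_run_result_from_sanitized_text
-- ===== SOURCE A (Python) =====
-- from typing import Literal
--
-- def parse_run_result_from_sanitized_text(
--     text: str,
-- ) -> tuple[Literal["success", "fail", "unknown"], str | None]:
--     # Input is already ANSI-free.
--     lines = [line_text.strip() for line_text in text.splitlines() if line_text.strip()]
--     result_line: str | None = None
--     for line in reversed(lines[-200:]):
--         if line.startswith("RESULT:"):
--             result_line = line
--             break
--     if result_line == "RESULT: SUCCESS":
--         return "success", result_line
--     if result_line == "RESULT: FAIL":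
--         return "fail", result_line
--     return "unknown", result_line
-- ===== SOURCE B (Python) =====
-- def parse_run_result_from_sanitized_text(text):
--     # Forward pass: count non-blank lines and remember the position of the last
--     # "RESULT:" line; it is the answer iff its position lies in the last-200 window.
--     n = 0
--     last = None
--     for raw in text.splitlines():
--         line = raw.strip()
--         if line:
--             if line.startswith("RESULT:"):
--                 last = (n, line)
--             n += 1
--     result_line = None
--     if last is not None and last[0] >= n - 200:
--         result_line = last[1]
--     status = {"RESULT: SUCCESS": "success", "RESULT: FAIL": "fail"}.get(result_line, "unknown")
--     return status, result_line
-- ===== Notes on version B (the rewrite author's own statement) =====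
-- stated objective: alternative
-- what changed: Replaces the backward strategy (build stripped non-blank list, slice its last 200, scan the reversed slice for the first RESULT: line, map via an if-chain) with a forward single pass that counts non-blank lines and records the position of the last RESULT: line, then decides window membership arithmetically (pos >= n - 200) and maps the line through a dict lookup table.
import Mathlib
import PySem

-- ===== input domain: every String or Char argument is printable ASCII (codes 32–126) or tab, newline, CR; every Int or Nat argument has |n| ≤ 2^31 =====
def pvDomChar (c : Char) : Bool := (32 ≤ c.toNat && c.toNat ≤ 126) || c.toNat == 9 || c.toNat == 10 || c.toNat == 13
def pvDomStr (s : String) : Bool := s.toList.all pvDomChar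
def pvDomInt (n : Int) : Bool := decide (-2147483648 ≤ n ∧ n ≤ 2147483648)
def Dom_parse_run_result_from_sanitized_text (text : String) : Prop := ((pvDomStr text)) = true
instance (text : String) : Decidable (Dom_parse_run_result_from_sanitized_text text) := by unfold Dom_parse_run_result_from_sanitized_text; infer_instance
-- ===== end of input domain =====

-- B replaces A's filter-strip list + last-200 slice + reversed scan with a single
-- FORWARD pass that counts non-blank lines and remembers the position of the last
-- "RESULT:" line, deciding window membership by arithmetic, and maps it through a
-- dict lookup table (alternative decomposition, same cost).


-- ===== PORT A =====
-- the 'for … break' scan for the first line starting with "RESULT:" is List.find?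
def parse_run_result_from_sanitized_text (text : String) : String × Option String :=
  let lines : List String :=
    (PySem.Str.splitlines text).filterMap (fun l =>
      let s := PySem.Str.strip l
      if s = "" then none else some s)
  let result_line : Option String :=
    (PySem.List.slice lines (some (-200)) none).reverse.find?
      (fun line => PySem.Str.startswith line "RESULT:")
  if result_line = some "RESULT: SUCCESS" then ("success", result_line)
  else if result_line = some "RESULT: FAIL" then ("fail", result_line)
  else ("unknown", result_line)

-- ===== PORT B =====
-- B's loop body: state (n, last); blank lines leave it unchanged, a "RESULT:" line
-- records (current position, line), every non-blank line increments n.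
def pvStep (st : Nat × Option (Nat × String)) (raw : String) : Nat × Option (Nat × String) :=
  let line := PySem.Str.strip raw
  if line = "" then st
  else (st.1 + 1,
        if PySem.Str.startswith line "RESULT:" then some (st.1, line) else st.2)

def parse_run_result_from_sanitized_text_alt (text : String) : String × Option String :=
  let st := (PySem.Str.splitlines text).foldl pvStep (0, none)
  -- Python's 'last[0] >= n - 200' (n - 200 may be negative): with Nat truncated
  -- subtraction the comparison has the same truth value since last[0] ≥ 0 — exact.
  let result_line : Option String :=
    match st.2 with
    | some (pos, line) => if st.1 - 200 ≤ pos then some line else none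
    | none => none
  -- {…}.get(result_line, "unknown"): a None key never matches a str key, hence the match
  let status : String :=
    match result_line with
    | none => "unknown"
    | some s =>
        PySem.Dict.getD (PySem.Dict.mk [("RESULT: SUCCESS", "success"), ("RESULT: FAIL", "fail")]) s "unknown"
  (status, result_line)

-- ===== PRECONDITION & SPEC =====
def Spec_parse_run_result_from_sanitized_text (text : String) (out : String × Option String) : Prop := out = parse_run_result_from_sanitized_text_alt text
instance (text : String) (out : String × Option String) : Decidable (Spec_parse_run_result_from_sanitized_text text out) := by unfold Spec_parse_run_result_from_sanitized_text; infer_instance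

-- ===== CLAIM (what is proved, stated in full; the proofs are below) =====
def Claim_equal_parse_run_result_from_sanitized_text : Prop := ∀ (text : String), Dom_parse_run_result_from_sanitized_text text → Spec_parse_run_result_from_sanitized_text text (parse_run_result_from_sanitized_text text)

-- ===== LEMMAS AND PROOFS =====

-- the stripped-non-blank filter and the RESULT: predicate, named for the lemmas
def pvF (l : String) : Option String :=
  let s := PySem.Str.strip l
  if s = "" then none else some s

def pvP (line : String) : Bool := PySem.Str.startswith line "RESULT:"

-- B's step restricted to the already-filtered lines
def pvStepS (st : Nat × Option (Nat × String)) (s : String) : Nat × Option (Nat × String) :=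
  (st.1 + 1, if pvP s then some (st.1, s) else st.2)

-- skipping blanks in the raw fold = folding over the filtered list
theorem pvFold_raw (raws : List String) (st : Nat × Option (Nat × String)) :
    raws.foldl pvStep st = (raws.filterMap pvF).foldl pvStepS st := by
  induction raws generalizing st with
  | nil => rfl
  | cons r rest ih =>
      by_cases hb : PySem.Str.strip r = "" <;>
        simp [List.foldl, pvF, pvStep, pvStepS, pvP, hb, ih]

-- first component of the fold counts the lines
theorem pvFold_fst (F : List String) (k : Nat) (a : Option (Nat × String)) :
    (F.foldl pvStepS (k, a)).1 = k + F.length := by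
  induction F generalizing k a with
  | nil => simp
  | cons s F ih =>
      simp only [List.foldl, pvStepS]
      rw [ih]
      simp; omega

-- the recorded position is always below the count
theorem pvFold_lt (F : List String) (k : Nat) (a : Option (Nat × String))
    (ha : ∀ i s, a = some (i, s) → i < k) :
    ∀ i s, (F.foldl pvStepS (k, a)).2 = some (i, s) → i < k + F.length := by
  induction F generalizing k a with
  | nil => simpa using ha
  | cons t F ih =>
      intro i s h
      simp only [List.foldl, pvStepS] at h
      have := ih (k + 1) (if pvP t then some (k, t) else a)
        (by intro i s hh
            by_cases hp : pvP t
            · simp [hp] at hh; omega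
            · simp [hp] at hh; exact Nat.lt_succ_of_lt (ha i s hh)) i s h
      simp only [List.length_cons]
      omega

-- the reverse scan of the last m filtered lines = forward last-match plus window check
theorem pvMain (F : List String) (m : Nat) :
    (F.reverse.take m).find? pvP =
      (match (F.foldl pvStepS (0, none)).2 with
       | some (i, s) => if F.length - m ≤ i then some s else none
       | none => none) := by
  induction F using List.reverseRecOn generalizing m with
  | nil => simp
  | append_singleton F' s ih =>
      have hfst : (F'.foldl pvStepS (0, none)).1 = F'.length := by
        simpa using pvFold_fst F' 0 none
      have hlt := pvFold_lt F' 0 none (by simp)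
      rw [List.foldl_append]
      simp only [List.foldl, pvStepS, hfst, List.reverse_append, List.reverse_singleton,
        List.singleton_append, List.length_append, List.length_singleton]
      cases m with
      | zero =>
          simp only [List.take_zero, List.find?_nil]
          by_cases hp : pvP s
          · simp [hp]
          · simp only [hp]
            cases h2 : (F'.foldl pvStepS (0, none)).2 with
            | none => simp
            | some x =>
                obtain ⟨i, t⟩ := x
                have := hlt i t h2
                simp
                omega
      | succ m' =>
          simp only [List.take_succ_cons, List.find?_cons]
          by_cases hp : pvP s
          · have : F'.length + 1 - (m' + 1) ≤ F'.length := by omega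
            simp [hp]
          · have harith : F'.length + 1 - (m' + 1) = F'.length - m' := by omega
            simp only [hp, harith]
            exact ih m'

-- the last-200 slice reversed is the first 200 of the reverse
theorem pvSlice_last_reverse {α : Type} (L : List α) :
    (PySem.List.slice L (some (-200)) none).reverse = L.reverse.take 200 := by
  rw [PySem.List.slice_from_neg_ofNat L 200 (by omega)]
  rw [List.reverse_drop]
  rcases Nat.lt_or_ge L.length 200 with h | h
  · rw [List.take_of_length_le (by simp; omega), List.take_of_length_le (by simp; omega)]
  · have h2 : L.length - (L.length - 200) = 200 := by omega
    rw [h2]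

-- A's if-chain and B's dict lookup agree on every result_line
theorem pvStatus_eq (r : Option String) :
    (if r = some "RESULT: SUCCESS" then (("success" : String), r)
     else if r = some "RESULT: FAIL" then ("fail", r)
     else ("unknown", r)) =
    ((match r with
      | none => "unknown"
      | some s =>
          PySem.Dict.getD (PySem.Dict.mk [("RESULT: SUCCESS", "success"), ("RESULT: FAIL", "fail")]) s "unknown"), r) := by
  cases r with
  | none => simp
  | some s =>
      by_cases h1 : s = "RESULT: SUCCESS"
      · simp [h1, PySem.Dict.getD, PySem.Dict.get?_mk_cons]
      · by_cases h2 : s = "RESULT: FAIL"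
        · simp [h2, PySem.Dict.getD, PySem.Dict.get?_mk_cons]
        · have e1 : ("RESULT: SUCCESS" == s) = false := beq_eq_false_iff_ne.mpr (Ne.symm h1)
          have e2 : ("RESULT: FAIL" == s) = false := beq_eq_false_iff_ne.mpr (Ne.symm h2)
          simp [PySem.Dict.getD, PySem.Dict.get?, List.find?, e1, e2, h1, h2]

set_option maxRecDepth 4096 in
set_option maxHeartbeats 1000000 in
theorem pvParse_eq (text : String) :
    parse_run_result_from_sanitized_text text = parse_run_result_from_sanitized_text_alt text := by
  unfold parse_run_result_from_sanitized_text parse_run_result_from_sanitized_text_alt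
  rw [pvFold_raw]
  have hfst : ((PySem.Str.splitlines text).filterMap pvF |>.foldl pvStepS (0, none)).1
      = ((PySem.Str.splitlines text).filterMap pvF).length := by
    simpa using pvFold_fst ((PySem.Str.splitlines text).filterMap pvF) 0 none
  have hF : (fun l => let s := PySem.Str.strip l; if s = "" then none else some s) = pvF := rfl
  have hP : (fun line => PySem.Str.startswith line "RESULT:") = pvP := rfl
  simp only [hF, hP, pvSlice_last_reverse, pvMain _ 200, hfst]
  exact pvStatus_eq _

-- ===== VERDICT (by name: the statement is the Claim_ definition above) =====
theorem parse_run_result_from_sanitized_text_spec : Claim_equal_parse_run_result_from_sanitized_text := by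
  intro text _
  exact pvParse_eq text
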